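-- pv_equiv track=rewrite | github.com/thehalleyyoung/deppy | tests/test_equivalence/test_hard_eq_pairs.py | eq22b
-- ===== SOURCE A (Python) =====
-- def eq22b(graph, start):
--     """Brent's cycle detection."""
--     if start is None or start not in graph:
--         return 0
--     slow = start
--     fast = graph.get(start)
--     if fast is None:
--         return 0
--     power = lam = 1
--     while fast != slow:
--         if power == lam:
--             slow = fast
--             power *= 2
--             lam = 0
--         fast = graph.get(fast)
--         if fast is None:
--             return 0
--         lam += 1
--     return lam
-- ===== SOURCE B (Python) =====
-- def eq22b(graph, start):
--     """Single forward walk recording each node's step index; cycle length = i - seen[node]."""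
--     seen = {}
--     node = start
--     i = 0
--     while node is not None and node in graph:
--         if node in seen:
--             return i - seen[node]
--         seen[node] = i
--         node = graph.get(node)
--         i += 1
--     return 0
-- ===== Notes on version B (the rewrite author's own statement) =====
-- stated objective: simpler
-- what changed: Replaced Brent's slow/fast teleporting two-pointer scheme with a single forward walk that records each node's first-visit index in a dict and returns i - seen[node] at the first revisit.
import Mathlib
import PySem

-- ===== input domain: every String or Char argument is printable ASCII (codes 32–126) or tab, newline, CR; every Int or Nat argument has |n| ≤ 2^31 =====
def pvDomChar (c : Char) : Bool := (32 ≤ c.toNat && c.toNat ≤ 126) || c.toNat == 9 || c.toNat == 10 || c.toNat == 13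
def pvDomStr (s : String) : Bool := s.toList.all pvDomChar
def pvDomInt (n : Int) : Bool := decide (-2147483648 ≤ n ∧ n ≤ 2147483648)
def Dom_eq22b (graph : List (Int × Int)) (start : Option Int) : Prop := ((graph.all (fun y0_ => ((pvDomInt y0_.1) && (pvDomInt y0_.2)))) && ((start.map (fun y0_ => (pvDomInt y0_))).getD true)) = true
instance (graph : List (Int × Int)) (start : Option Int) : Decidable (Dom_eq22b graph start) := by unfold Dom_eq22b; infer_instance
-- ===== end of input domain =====

-- B replaces Brent's slow/fast teleporting pointers by one forward walk with a dict of
-- first-visit indices (simpler single-pass bookkeeping); the return values are proved equal.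

-- ===== PORT A =====
-- graph.get / `in graph` on the dict (association list, unique keys): first-match lookup
def pvLookup : List (Int × Int) → Int → Option Int
  | [], _ => none
  | (a, b) :: t, k => if a = k then some b else pvLookup t k

-- Brent's while-loop, step for step; the fuel 4*len+8 is proved sufficient below
-- (the loop always returns strictly before exhausting it)
def eq22bLoop (g : List (Int × Int)) : Nat → Int → Int → Nat → Nat → Int
  | 0, _, _, _, _ => 0
  | fuel+1, slow, fast, power, lam =>
    if fast = slow then (lam : Int)
    else
      let slow' := if power = lam then fast else slow
      let power' := if power = lam then power * 2 else power
      let lam' := if power = lam then 0 else lam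
      match pvLookup g fast with
      | none => 0
      | some fast' => eq22bLoop g fuel slow' fast' power' (lam' + 1)

def eq22b (graph : List (Int × Int)) (start : Option Int) : Int :=
  match start with
  | none => 0
  | some s =>
    if (pvLookup graph s).isNone then 0
    else
      match pvLookup graph s with
      | none => 0
      | some fast => eq22bLoop graph (4 * graph.length + 8) s fast 1 1

-- ===== PORT B =====
-- forward walk with the first-visit index dict; the fuel len+2 is proved sufficient below
def eq22bAltLoop (g : List (Int × Int)) : Nat → PySem.Dict Int Nat → Option Int → Nat → Int
  | 0, _, _, _ => 0
  | fuel+1, seen, node, i =>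
    match node with
    | none => 0
    | some x =>
      if (pvLookup g x).isNone then 0
      else
        match seen.get? x with
        | some j => (i : Int) - (j : Int)
        | none => eq22bAltLoop g fuel (seen.insert x i) (pvLookup g x) (i + 1)

def eq22b_alt (graph : List (Int × Int)) (start : Option Int) : Int :=
  eq22bAltLoop graph (graph.length + 2) PySem.Dict.empty start 0

-- ===== PRECONDITION & SPEC =====
def Spec_eq22b (graph : List (Int × Int)) (start : Option Int) (out : Int) : Prop := out = eq22b_alt graph start
instance (graph : List (Int × Int)) (start : Option Int) (out : Int) : Decidable (Spec_eq22b graph start out) := by unfold Spec_eq22b; infer_instance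

-- ===== CLAIM (what is proved, stated in full; the proofs are below) =====
def Claim_equal_eq22b : Prop := ∀ (graph : List (Int × Int)) (start : Option Int), Dom_eq22b graph start → Spec_eq22b graph start (eq22b graph start)

-- ===== LEMMAS AND PROOFS =====

-- the orbit of the successor map
def orbF (g : List (Int × Int)) (o : Option Int) : Nat → Option Int
  | 0 => o
  | m+1 => (orbF g o m).bind (pvLookup g)

def xSeq (g : List (Int × Int)) (s : Int) (m : Nat) : Int := (orbF g (some s) m).getD 0

theorem orbF_add (g : List (Int × Int)) (o : Option Int) (m t : Nat) :
    orbF g o (m + t) = orbF g (orbF g o m) t := by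
  induction t with
  | zero => rfl
  | succ t ih => show (orbF g o (m+t)).bind _ = _; rw [ih]; rfl

theorem orb_eq_some (g : List (Int × Int)) (s : Int) (m : Nat)
    (h : (orbF g (some s) m).isSome) : orbF g (some s) m = some (xSeq g s m) := by
  cases he : orbF g (some s) m with
  | none => rw [he] at h; simp at h
  | some v => simp [xSeq, he]

theorem two_pow_big (n : Nat) : n < 2^n := by
  induction n with
  | zero => simp
  | succ n ih => rw [pow_succ]; omega

theorem lookup_isSome_mem (g : List (Int × Int)) (k : Int) (h : (pvLookup g k).isSome) :
    k ∈ g.map Prod.fst := by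
  induction g with
  | nil => simp [pvLookup] at h
  | cons p t ih =>
    obtain ⟨a, b⟩ := p
    by_cases hak : a = k
    · simp [hak]
    · simp only [pvLookup, if_neg hak] at h
      simp [ih h]

-- pigeonhole: a distinct orbit prefix inside the key list is no longer than the list
theorem pigeon (g : List (Int × Int)) (s : Int) (t : Nat)
    (hmem : ∀ m, m < t → xSeq g s m ∈ g.map Prod.fst)
    (hdist : ∀ i j, i < j → j < t → xSeq g s i ≠ xSeq g s j) : t ≤ g.length := by
  have hnd : ((List.range t).map (xSeq g s)).Nodup := by
    refine List.Nodup.map_on ?_ List.nodup_range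
    intro i hi j hj hij
    simp only [List.mem_range] at hi hj
    rcases lt_trichotomy i j with h | h | h
    · exact absurd hij (hdist i j h hj)
    · exact h
    · exact absurd hij.symm (hdist j i h hi)
  have hsub : ((List.range t).map (xSeq g s)) ⊆ g.map Prod.fst := by
    intro y hy
    simp only [List.mem_map, List.mem_range] at hy
    obtain ⟨m, hm, rfl⟩ := hy
    exact hmem m hm
  have := (List.subperm_of_subset hnd hsub).length_le
  simpa using this

-- ===== the total (eventually cyclic) case =====

theorem xSeq_step (g : List (Int × Int)) (s : Int)
    (htot : ∀ m, (orbF g (some s) m).isSome) (m : Nat) :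
    pvLookup g (xSeq g s m) = some (xSeq g s (m+1)) := by
  have h1 := orb_eq_some g s m (htot m)
  have h2 := orb_eq_some g s (m+1) (htot (m+1))
  have he : orbF g (some s) (m+1) = pvLookup g (xSeq g s m) := by
    show (orbF g (some s) m).bind _ = _
    rw [h1]; rfl
  rw [← he]; exact h2

theorem xSeq_shift (g : List (Int × Int)) (s : Int)
    (htot : ∀ m, (orbF g (some s) m).isSome) (a b : Nat)
    (h : xSeq g s a = xSeq g s b) (t : Nat) : xSeq g s (a+t) = xSeq g s (b+t) := by
  show (orbF g (some s) (a+t)).getD 0 = (orbF g (some s) (b+t)).getD 0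
  rw [orbF_add, orbF_add, orb_eq_some g s a (htot a), orb_eq_some g s b (htot b), h]

theorem xSeq_period (g : List (Int × Int)) (s : Int)
    (htot : ∀ m, (orbF g (some s) m).isSome) (N μ : Nat) (hμN : μ < N)
    (hrep : xSeq g s μ = xSeq g s N) (i : Nat) (hi : μ ≤ i) :
    xSeq g s (i + (N-μ)) = xSeq g s i := by
  have h1 := xSeq_shift g s htot N μ hrep.symm (i-μ)
  have e1 : i + (N-μ) = N + (i-μ) := by omega
  have e2 : μ + (i-μ) = i := by omega
  rw [e1, h1, e2]

theorem xSeq_mod (g : List (Int × Int)) (s : Int)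
    (htot : ∀ m, (orbF g (some s) m).isSome) (N μ : Nat) (hμN : μ < N)
    (hrep : xSeq g s μ = xSeq g s N) :
    ∀ t, xSeq g s (μ + t) = xSeq g s (μ + t % (N-μ)) := by
  intro t
  induction t using Nat.strong_induction_on with
  | _ t ih =>
    by_cases hlt : t < N-μ
    · rw [Nat.mod_eq_of_lt hlt]
    · have hlam : 1 ≤ N-μ := by omega
      have e : μ + t = (μ + (t-(N-μ))) + (N-μ) := by omega
      rw [e, xSeq_period g s htot N μ hμN hrep _ (by omega)]
      have e2 : t % (N-μ) = (t-(N-μ)) % (N-μ) := by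
        conv_lhs => rw [show t = (t-(N-μ)) + (N-μ) by omega]
        rw [Nat.add_mod_right]
      rw [e2]
      exact ih (t-(N-μ)) (by omega)

theorem xSeq_meet (g : List (Int × Int)) (s : Int)
    (htot : ∀ m, (orbF g (some s) m).isSome) (N μ : Nat) (hμN : μ < N)
    (hrep : xSeq g s μ = xSeq g s N)
    (hdist : ∀ i j, i < j → j < N → xSeq g s i ≠ xSeq g s j)
    (i m : Nat) (hm : 1 ≤ m) (h : xSeq g s (i+m) = xSeq g s i) :
    μ ≤ i ∧ (N-μ) ∣ m := by
  have hNle : N ≤ i + m := by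
    by_contra hc
    push_neg at hc
    exact hdist i (i+m) (by omega) hc h.symm
  have hlam1 : 1 ≤ N - μ := by omega
  have hr2 : xSeq g s (i+m) = xSeq g s (μ + (i+m-μ) % (N-μ)) := by
    have h5 := xSeq_mod g s htot N μ hμN hrep (i+m-μ)
    rw [show μ + (i+m-μ) = i+m by omega] at h5
    exact h5
  have hμi : μ ≤ i := by
    by_contra hc
    push_neg at hc
    have hrlt : μ + (i+m-μ) % (N-μ) < N := by
      have := Nat.mod_lt (i+m-μ) (y := N-μ) (by omega)
      omega
    exact hdist i (μ + (i+m-μ) % (N-μ)) (by omega) hrlt (h.symm.trans hr2)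
  have hr1 : xSeq g s i = xSeq g s (μ + (i-μ) % (N-μ)) := by
    have h5 := xSeq_mod g s htot N μ hμN hrep (i-μ)
    rw [show μ + (i-μ) = i by omega] at h5
    exact h5
  have hre : μ + (i-μ) % (N-μ) = μ + (i+m-μ) % (N-μ) := by
    by_contra hne
    have hx : xSeq g s (μ + (i-μ) % (N-μ)) = xSeq g s (μ + (i+m-μ) % (N-μ)) :=
      hr1.symm.trans (h.symm.trans hr2)
    have hb1 : (i-μ) % (N-μ) < N-μ := Nat.mod_lt _ (by omega)
    have hb2 : (i+m-μ) % (N-μ) < N-μ := Nat.mod_lt _ (by omega)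
    rcases lt_trichotomy (μ + (i-μ) % (N-μ)) (μ + (i+m-μ) % (N-μ)) with hlt | heq | hgt
    · exact hdist _ _ hlt (by omega) hx
    · exact hne heq
    · exact hdist _ _ hgt (by omega) hx.symm
  have hmodeq : (i-μ) % (N-μ) = ((i-μ)+m) % (N-μ) := by
    have e3 : i+m-μ = (i-μ)+m := by omega
    rw [e3] at hre
    omega
  have hdvd := (Nat.modEq_iff_dvd' (Nat.le_add_right _ _)).mp hmodeq
  simp only [Nat.add_sub_cancel_left] at hdvd
  exact ⟨hμi, hdvd⟩

theorem brentLoop_cyc (g : List (Int × Int)) (s : Int)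
    (htot : ∀ m, (orbF g (some s) m).isSome) (N μ : Nat) (hμN : μ < N)
    (hrep : xSeq g s μ = xSeq g s N)
    (hdist : ∀ i j, i < j → j < N → xSeq g s i ≠ xSeq g s j)
    (k0 : Nat) (hk0 : μ ≤ 2^k0 - 1 ∧ N-μ ≤ 2^k0)
    (hk0m : ∀ k', k' < k0 → ¬(μ ≤ 2^k'-1 ∧ N-μ ≤ 2^k')) :
    ∀ fuel k lamv, 1 ≤ lamv → lamv ≤ 2^k → k ≤ k0 → (k = k0 → lamv ≤ N-μ) →
      2^k0 + (N-μ) + 1 ≤ fuel + 2^k + lamv →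
      eq22bLoop g fuel (xSeq g s (2^k-1)) (xSeq g s (2^k-1+lamv)) (2^k) lamv
        = ((N-μ : Nat) : Int) := by
  intro fuel
  induction fuel with
  | zero =>
    intro k lamv h1 h2 hk hcur hfuel
    exfalso
    rcases Nat.lt_or_ge k k0 with hlt | hge
    · have hkk : (2:Nat)^(k+1) ≤ 2^k0 := Nat.pow_le_pow_right (by norm_num) hlt
      rw [pow_succ] at hkk
      omega
    · have hkeq : k = k0 := le_antisymm hk hge
      have := hcur hkeq
      subst hkeq
      omega
  | succ fuel ih =>
    intro k lamv h1 h2 hk hcur hfuel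
    have hp1 : 0 < (2:Nat)^k := by positivity
    simp only [eq22bLoop]
    by_cases hmeet : xSeq g s (2^k-1+lamv) = xSeq g s (2^k-1)
    · rw [if_pos hmeet]
      obtain ⟨hμs, hdvd⟩ := xSeq_meet g s htot N μ hμN hrep hdist (2^k-1) lamv h1 hmeet
      have hle : N-μ ≤ lamv := Nat.le_of_dvd (by omega) hdvd
      have hkk0 : k0 ≤ k := by
        by_contra hc
        push_neg at hc
        exact hk0m k hc ⟨hμs, le_trans hle h2⟩
      have hkeq : k = k0 := le_antisymm hk hkk0
      have hveq : lamv = N-μ := le_antisymm (hcur hkeq) hle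
      rw [hveq]
    · rw [if_neg hmeet]
      have hstep := xSeq_step g s htot (2^k-1+lamv)
      simp only [hstep]
      by_cases hpl : (2:Nat)^k = lamv
      · -- teleport epoch boundary
        have hknk0 : k < k0 := by
          rcases Nat.lt_or_ge k k0 with hh | hh
          · exact hh
          · exfalso
            have hkeq : k = k0 := le_antisymm hk hh
            have hlamle : lamv ≤ N-μ := hcur hkeq
            have h2k0 : N-μ ≤ 2^k := by rw [hkeq]; exact hk0.2
            have hlameq : lamv = N-μ := by omega
            have hμk : μ ≤ 2^k-1 := by rw [hkeq]; exact hk0.1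
            exact hmeet (by rw [hlameq]; exact xSeq_period g s htot N μ hμN hrep (2^k-1) hμk)
        simp only [if_pos hpl]
        have hps : (2:Nat)^(k+1) = 2^k * 2 := pow_succ 2 k
        have e1 : 2^k-1+lamv = 2^(k+1)-1 := by omega
        rw [e1, ← pow_succ]
        exact ih (k+1) 1 (le_refl 1) (Nat.two_pow_pos (k+1)) hknk0 (fun _ => by omega) (by omega)
      · -- ordinary step
        have hlt : lamv < 2^k := lt_of_le_of_ne h2 (fun h => hpl h.symm)
        have hcur' : k = k0 → lamv+1 ≤ N-μ := by
          intro hkeq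
          have hlam := hcur hkeq
          rcases eq_or_lt_of_le hlam with he | hlt2
          · exfalso
            have hμk : μ ≤ 2^k-1 := by rw [hkeq]; exact hk0.1
            exact hmeet (by rw [he]; exact xSeq_period g s htot N μ hμN hrep (2^k-1) hμk)
          · omega
        simp only [if_neg hpl]
        rw [show (2:Nat)^k-1+lamv+1 = 2^k-1+(lamv+1) by omega]
        exact ih k (lamv+1) (by omega) (by omega) hk hcur' (by omega)

theorem altLoop_cyc (g : List (Int × Int)) (s : Int)
    (htot : ∀ m, (orbF g (some s) m).isSome) (N μ : Nat) (hμN : μ < N)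
    (hrep : xSeq g s μ = xSeq g s N)
    (hdist : ∀ i j, i < j → j < N → xSeq g s i ≠ xSeq g s j) :
    ∀ fuel i seen, i ≤ N →
      (∀ j, j < i → PySem.Dict.get? seen (xSeq g s j) = some j) →
      (∀ y, (PySem.Dict.get? seen y).isSome → ∃ j, j < i ∧ xSeq g s j = y) →
      N + 1 ≤ fuel + i →
      eq22bAltLoop g fuel seen (some (xSeq g s i)) i = ((N-μ : Nat) : Int) := by
  intro fuel
  induction fuel with
  | zero =>
    intro i seen hiN inv1 inv2 hfuel
    exact absurd hfuel (by omega)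
  | succ fuel ih =>
    intro i seen hiN inv1 inv2 hfuel
    simp only [eq22bAltLoop]
    have hstep := xSeq_step g s htot i
    rw [hstep]
    rw [if_neg (by simp)]
    by_cases hiNeq : i = N
    · have hμlook : PySem.Dict.get? seen (xSeq g s μ) = some μ := inv1 μ (by omega)
      have hNlook : PySem.Dict.get? seen (xSeq g s i) = some μ := by
        rw [hiNeq, ← hrep]; exact hμlook
      simp only [hNlook]
      rw [hiNeq, Nat.cast_sub (le_of_lt hμN)]
    · have hiN' : i < N := by omega
      have hnone : PySem.Dict.get? seen (xSeq g s i) = none := by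
        cases hsg : PySem.Dict.get? seen (xSeq g s i) with
        | none => rfl
        | some j =>
          exfalso
          obtain ⟨j', hj', he⟩ := inv2 (xSeq g s i) (by rw [hsg]; simp)
          exact hdist j' i hj' hiN' he
      simp only [hnone]
      refine ih (i+1) (seen.insert (xSeq g s i) i) (by omega) ?_ ?_ (by omega)
      · intro j hj
        rw [PySem.Dict.get?_insert]
        by_cases hji : j = i
        · subst hji; rw [if_pos rfl]
        · have hjlt : j < i := by omega
          rw [if_neg (hdist j i hjlt hiN')]
          exact inv1 j hjlt
      · intro y hy
        rw [PySem.Dict.get?_insert] at hy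
        by_cases hyx : y = xSeq g s i
        · exact ⟨i, by omega, hyx.symm⟩
        · rw [if_neg hyx] at hy
          obtain ⟨j, hj, he⟩ := inv2 y hy
          exact ⟨j, by omega, he⟩

-- ===== the dying-chain case =====

theorem dies_dist (g : List (Int × Int)) (s : Int) (n : Nat)
    (hnone : orbF g (some s) n = none)
    (hsome : ∀ m, m < n → (orbF g (some s) m).isSome) :
    ∀ i j, i < j → j < n → xSeq g s i ≠ xSeq g s j := by
  intro i j hij hjn heq
  have hi := orb_eq_some g s i (hsome i (by omega))
  have hj := orb_eq_some g s j (hsome j hjn)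
  have hchain : orbF g (some s) n = orbF g (some s) (i + (n-j)) := by
    conv_lhs => rw [show n = j + (n-j) by omega]
    rw [orbF_add, hj, ← heq, ← hi, ← orbF_add]
  have hS := hsome (i + (n-j)) (by omega)
  rw [← hchain, hnone] at hS
  simp at hS

theorem dies_step (g : List (Int × Int)) (s : Int) (n : Nat)
    (hnone : orbF g (some s) n = none)
    (hsome : ∀ m, m < n → (orbF g (some s) m).isSome)
    (m : Nat) (hm : m+1 < n) :
    pvLookup g (xSeq g s m) = some (xSeq g s (m+1)) := by
  have h1 := orb_eq_some g s m (hsome m (by omega))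
  have h2 := orb_eq_some g s (m+1) (hsome (m+1) hm)
  have he : orbF g (some s) (m+1) = pvLookup g (xSeq g s m) := by
    show (orbF g (some s) m).bind _ = _
    rw [h1]; rfl
  rw [← he]; exact h2

theorem dies_last (g : List (Int × Int)) (s : Int) (n : Nat) (hn : 1 ≤ n)
    (hnone : orbF g (some s) n = none)
    (hsome : ∀ m, m < n → (orbF g (some s) m).isSome) :
    pvLookup g (xSeq g s (n-1)) = none := by
  have h1 := orb_eq_some g s (n-1) (hsome (n-1) (by omega))
  have he : orbF g (some s) n = (orbF g (some s) (n-1)).bind (pvLookup g) := by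
    conv_lhs => rw [show n = (n-1)+1 by omega]
    rfl
  rw [he, h1] at hnone
  simpa using hnone

theorem brentLoop_dies (g : List (Int × Int)) (s : Int) (n : Nat)
    (hnone : orbF g (some s) n = none)
    (hsome : ∀ m, m < n → (orbF g (some s) m).isSome) :
    ∀ fuel sI fI power lamv, sI < fI → fI < n →
      eq22bLoop g fuel (xSeq g s sI) (xSeq g s fI) power lamv = 0 := by
  intro fuel
  induction fuel with
  | zero => intro sI fI power lamv _ _; rfl
  | succ fuel ih =>
    intro sI fI power lamv hsf hfn
    simp only [eq22bLoop]
    have hne : xSeq g s fI ≠ xSeq g s sI :=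
      fun h => dies_dist g s n hnone hsome sI fI hsf hfn h.symm
    rw [if_neg hne]
    by_cases hl : fI + 1 = n
    · have hend : pvLookup g (xSeq g s fI) = none := by
        have h5 := dies_last g s n (by omega) hnone hsome
        rw [show n-1 = fI by omega] at h5
        exact h5
      simp only [hend]
    · have hstep : pvLookup g (xSeq g s fI) = some (xSeq g s (fI+1)) :=
        dies_step g s n hnone hsome fI (by omega)
      simp only [hstep]
      by_cases hpl : power = lamv
      · simp only [if_pos hpl]
        exact ih fI (fI+1) (power*2) (0+1) (by omega) (by omega)
      · simp only [if_neg hpl]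
        exact ih sI (fI+1) power (lamv+1) (by omega) (by omega)

theorem altLoop_dies (g : List (Int × Int)) (s : Int) (n : Nat)
    (hnone : orbF g (some s) n = none)
    (hsome : ∀ m, m < n → (orbF g (some s) m).isSome) :
    ∀ fuel i seen, i < n →
      (∀ y, (PySem.Dict.get? seen y).isSome → ∃ j, j < i ∧ xSeq g s j = y) →
      eq22bAltLoop g fuel seen (some (xSeq g s i)) i = 0 := by
  intro fuel
  induction fuel with
  | zero => intro i seen _ _; rfl
  | succ fuel ih =>
    intro i seen hin inv2
    simp only [eq22bAltLoop]
    by_cases hl : i + 1 = n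
    · have hend : pvLookup g (xSeq g s i) = none := by
        have h5 := dies_last g s n (by omega) hnone hsome
        rw [show n-1 = i by omega] at h5
        exact h5
      simp [hend]
    · have hstep : pvLookup g (xSeq g s i) = some (xSeq g s (i+1)) :=
        dies_step g s n hnone hsome i (by omega)
      rw [hstep]
      rw [if_neg (by simp)]
      have hnone2 : PySem.Dict.get? seen (xSeq g s i) = none := by
        cases hsg : PySem.Dict.get? seen (xSeq g s i) with
        | none => rfl
        | some j =>
          exfalso
          obtain ⟨j', hj', he⟩ := inv2 (xSeq g s i) (by rw [hsg]; simp)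
          exact dies_dist g s n hnone hsome j' i hj' hin he
      simp only [hnone2]
      refine ih (i+1) (seen.insert (xSeq g s i) i) (by omega) ?_
      intro y hy
      rw [PySem.Dict.get?_insert] at hy
      by_cases hyx : y = xSeq g s i
      · exact ⟨i, by omega, hyx.symm⟩
      · rw [if_neg hyx] at hy
        obtain ⟨j, hj, he⟩ := inv2 y hy
        exact ⟨j, by omega, he⟩

-- small evaluation helpers for the wrappers
theorem altLoop_none (g : List (Int × Int)) (fuel : Nat) (seen : PySem.Dict Int Nat) (i : Nat) :
    eq22bAltLoop g fuel seen none i = 0 := by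
  cases fuel <;> rfl

theorem altLoop_notin (g : List (Int × Int)) (fuel : Nat) (seen : PySem.Dict Int Nat)
    (xx : Int) (i : Nat) (h : pvLookup g xx = none) :
    eq22bAltLoop g (fuel+1) seen (some xx) i = 0 := by
  simp [eq22bAltLoop, h]

-- ===== VERDICT (by name: the statement is the Claim_ definition above) =====
theorem eq22b_spec : Claim_equal_eq22b := by
  intro g start _
  unfold Spec_eq22b
  cases start with
  | none =>
    show eq22b g none = eq22b_alt g none
    unfold eq22b_alt
    rw [altLoop_none]
    rfl
  | some s =>
    show eq22b g (some s) = eq22b_alt g (some s)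
    by_cases hmem : pvLookup g s = none
    · have hA : eq22b g (some s) = 0 := by simp [eq22b, hmem]
      have hB : eq22b_alt g (some s) = 0 := by
        unfold eq22b_alt
        exact altLoop_notin g (g.length+1) PySem.Dict.empty s 0 hmem
      rw [hA, hB]
    · cases hfv : pvLookup g s with
      | none => exact absurd hfv hmem
      | some f1 =>
        by_cases hdies : ∃ m, orbF g (some s) m = none
        · -- the chain leaves the graph: both return 0
          obtain ⟨n, hnone, hsome⟩ :
              ∃ n, orbF g (some s) n = none ∧ ∀ m, m < n → (orbF g (some s) m).isSome :=
            ⟨Nat.find hdies, Nat.find_spec hdies,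
              fun m hm => Option.ne_none_iff_isSome.mp (Nat.find_min hdies hm)⟩
          have hn2 : 2 ≤ n := by
            by_contra hc
            push_neg at hc
            interval_cases n
            · simp [orbF] at hnone
            · exact hmem hnone
          have hx1 : pvLookup g s = some (xSeq g s 1) :=
            dies_step g s n hnone hsome 0 (by omega)
          have hf1 : f1 = xSeq g s 1 := by
            rw [hfv] at hx1
            exact Option.some.inj hx1
          have hA : eq22b g (some s) = 0 := by
            simp only [eq22b, hfv, Option.isNone_some, Bool.false_eq_true, if_false]
            rw [hf1]
            exact brentLoop_dies g s n hnone hsome (4*g.length+8) 0 1 1 1 (by omega) (by omega)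
          have hB : eq22b_alt g (some s) = 0 := by
            unfold eq22b_alt
            exact altLoop_dies g s n hnone hsome (g.length+2) 0 PySem.Dict.empty (by omega)
              (fun y hy => by simp [PySem.Dict.get?_empty] at hy)
          rw [hA, hB]
        · -- the chain is total: both return the cycle length
          have htot : ∀ m, (orbF g (some s) m).isSome := by
            push_neg at hdies
            exact fun m => Option.ne_none_iff_isSome.mp (hdies m)
          have hmemk : ∀ m, xSeq g s m ∈ g.map Prod.fst := fun m =>
            lookup_isSome_mem g _ (by rw [xSeq_step g s htot m]; rfl)
          have hrep0 : ∃ jj, ∃ ii, ii < jj ∧ xSeq g s ii = xSeq g s jj := by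
            by_contra hc
            push_neg at hc
            have := pigeon g s (g.length+1) (fun m _ => hmemk m)
              (fun i j hij _ => hc j i hij)
            omega
          obtain ⟨N, ⟨μ, hμN, hrep⟩, hNmin⟩ :
              ∃ N, (∃ μ, μ < N ∧ xSeq g s μ = xSeq g s N) ∧
                ∀ j, j < N → ¬∃ i, i < j ∧ xSeq g s i = xSeq g s j :=
            ⟨Nat.find hrep0, Nat.find_spec hrep0, fun j hj => Nat.find_min hrep0 hj⟩
          have hdist : ∀ i j, i < j → j < N → xSeq g s i ≠ xSeq g s j :=
            fun i j hij hj he => hNmin j hj ⟨i, hij, he⟩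
          have hNle : N ≤ g.length := pigeon g s N (fun m _ => hmemk m) hdist
          have hex : ∃ k, μ ≤ 2^k - 1 ∧ N-μ ≤ 2^k :=
            ⟨N, by have := two_pow_big N; omega⟩
          obtain ⟨k0, hk0, hk0m⟩ :
              ∃ k0, (μ ≤ 2^k0-1 ∧ N-μ ≤ 2^k0) ∧
                ∀ k', k' < k0 → ¬(μ ≤ 2^k'-1 ∧ N-μ ≤ 2^k') :=
            ⟨Nat.find hex, Nat.find_spec hex, fun k' hk' => Nat.find_min hex hk'⟩
          have h2k0 : 2^k0 ≤ 2*N := by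
            cases k0 with
            | zero => simp; omega
            | succ k' =>
              have hfail := hk0m k' (Nat.lt_succ_self k')
              have hp1 : 0 < (2:Nat)^k' := by positivity
              rcases not_and_or.mp hfail with hh | hh
              · have h6 : 2^k' ≤ μ := by omega
                rw [pow_succ]; omega
              · have h6 : 2^k' < N-μ := by omega
                rw [pow_succ]; omega
          have hx1 : pvLookup g s = some (xSeq g s 1) := xSeq_step g s htot 0
          have hf1 : f1 = xSeq g s 1 := by
            rw [hfv] at hx1
            exact Option.some.inj hx1
          have hA : eq22b g (some s) = ((N-μ : Nat) : Int) := by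
            simp only [eq22b, hfv, Option.isNone_some, Bool.false_eq_true, if_false]
            rw [hf1]
            exact brentLoop_cyc g s htot N μ hμN hrep hdist k0 hk0 hk0m
              (4*g.length+8) 0 1 (le_refl 1) (by norm_num) (Nat.zero_le k0)
              (fun _ => by omega) (by omega)
          have hB : eq22b_alt g (some s) = ((N-μ : Nat) : Int) := by
            unfold eq22b_alt
            exact altLoop_cyc g s htot N μ hμN hrep hdist (g.length+2) 0 PySem.Dict.empty
              (Nat.zero_le N) (fun j hj => absurd hj (Nat.not_lt_zero j))
              (fun y hy => by simp [PySem.Dict.get?_empty] at hy) (by omega)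
          rw [hA, hB]
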